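-- pv_equiv track=rewrite | github.com/Pjoterro/adventofocde | 2015/day22.py | is_combination_correct
-- ===== SOURCE A (Python) =====
-- def is_combination_correct(combination): # checking if spells over time are not cast too often
--     last_index = -1
--     for spell in ["SH", "P", "R"]:
--         last_index = -1
--         i = 0
--         turn = 1
--         while i < len(combination):
--             if last_index == -1 and combination[i] == spell: # finding first index
--                 last_index = turn
--             if combination[i] == spell and last_index >= 0 and turn-last_index < 6:
--                 return False
--             i += 1
--             turn += 2
--     return True
-- ===== SOURCE B (Python) =====
-- def is_combination_correct(combination):
--     # A's timing arithmetic is dead code: it returns False at the FIRST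
--     # occurrence of any over-time spell, so this is just a membership check.
--     for i in range(len(combination)):
--         if combination[i] in ("SH", "P", "R"):
--             return False
--     return True
-- ===== Notes on version B (the rewrite author's own statement) =====
-- stated objective: simpler
-- what changed: A's turn/last_index bookkeeping is dead code (it returns False at the first occurrence of 'SH','P' or 'R'), so B replaces the three full nested scans with one early-exiting membership pass.
import Mathlib
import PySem

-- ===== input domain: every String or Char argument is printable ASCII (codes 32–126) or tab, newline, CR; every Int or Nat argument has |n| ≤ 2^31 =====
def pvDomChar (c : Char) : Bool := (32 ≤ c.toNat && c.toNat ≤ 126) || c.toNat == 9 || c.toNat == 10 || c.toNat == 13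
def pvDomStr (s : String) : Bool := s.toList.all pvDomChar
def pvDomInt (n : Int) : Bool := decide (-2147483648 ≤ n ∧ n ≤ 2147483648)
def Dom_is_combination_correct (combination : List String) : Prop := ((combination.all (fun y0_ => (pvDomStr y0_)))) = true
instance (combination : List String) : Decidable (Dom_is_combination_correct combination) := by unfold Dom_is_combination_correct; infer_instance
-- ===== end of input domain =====

-- B: A's turn/last_index bookkeeping is dead code; one membership pass (objective: simpler).


-- ===== PORT A =====
-- inner while-loop of A for one spell: carries turn and last_index; the i-indexed
-- scan over `combination` becomes structural recursion over the remaining list.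
def pvInnerA (spell : String) : List String → Int → Int → Bool
  | [], _, _ => true
  | c :: rest, turn, last_index =>
      let last_index := if last_index == -1 && c == spell then turn else last_index
      if c == spell && decide (last_index ≥ 0) && decide (turn - last_index < 6) then false
      else pvInnerA spell rest (turn + 2) last_index

def is_combination_correct (combination : List String) : Bool :=
  -- for spell in ["SH","P","R"]: run the while loop; an early `return False`
  -- in any iteration makes the whole result false.
  (["SH", "P", "R"] : List String).all (fun spell => pvInnerA spell combination 1 (-1))

-- ===== PORT B =====
-- one pass: False iff some element is one of the three spell names
def is_combination_correct_alt (combination : List String) : Bool :=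
  combination.all (fun s => !(s == "SH" || s == "P" || s == "R"))

-- ===== PRECONDITION & SPEC =====
def Spec_is_combination_correct (combination : List String) (out : Bool) : Prop := out = is_combination_correct_alt combination
instance (combination : List String) (out : Bool) : Decidable (Spec_is_combination_correct combination out) := by unfold Spec_is_combination_correct; infer_instance

-- ===== CLAIM (what is proved, stated in full; the proofs are below) =====
def Claim_equal_is_combination_correct : Prop := ∀ (combination : List String), Dom_is_combination_correct combination → Spec_is_combination_correct combination (is_combination_correct combination)

-- ===== LEMMAS AND PROOFS =====
-- A's inner loop with last_index = -1 and a positive turn is just "spell does not occur".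
theorem pvInnerA_eq_all (spell : String) (xs : List String) (turn : Int) (ht : 0 < turn) :
    pvInnerA spell xs turn (-1) = xs.all (fun s => !(s == spell)) := by
  induction xs generalizing turn with
  | nil => simp [pvInnerA]
  | cons c rest ih =>
    by_cases h : c = spell
    · simp [pvInnerA, h]
      omega
    · simp [pvInnerA, h, ih (turn + 2) (by omega)]

theorem pvAll_and {α : Type} (f g : α → Bool) (xs : List α) :
    (xs.all fun x => f x && g x) = (xs.all f && xs.all g) := by
  induction xs with
  | nil => simp
  | cons c rest ih =>
    simp [ih]
    cases f c <;> cases g c <;> simp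

-- ===== VERDICT (by name: the statement is the Claim_ definition above) =====
theorem is_combination_correct_spec : Claim_equal_is_combination_correct := by
  intro combination _
  unfold Spec_is_combination_correct is_combination_correct is_combination_correct_alt
  simp only [List.all_cons, List.all_nil, pvInnerA_eq_all _ _ 1 (by omega), Bool.and_true]
  rw [show (fun s : String => !(s == "SH" || s == "P" || s == "R")) =
      fun s => (!(s == "SH")) && ((!(s == "P")) && (!(s == "R"))) from
    funext fun s => by cases s == "SH" <;> cases s == "P" <;> cases s == "R" <;> simp]
  rw [pvAll_and, pvAll_and]
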